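-- pv_equiv track=rewrite | github.com/Aierlanta/cs61a | lab06/lab06.py | insert_items
-- ===== SOURCE A (Python) =====
-- def insert_items(lst: list, entry: int, elem: int):
--     """Inserts elem into lst after each occurrence of entry and then returns lst.
--
--     >>> test_lst = [1, 5, 8, 5, 2, 3]
--     >>> new_lst = insert_items(test_lst, 5, 7)
--     >>> new_lst
--     [1, 5, 7, 8, 5, 7, 2, 3]
--     >>> test_lst
--     [1, 5, 7, 8, 5, 7, 2, 3]
--     >>> double_lst = [1, 2, 1, 2, 3, 3]
--     >>> double_lst = insert_items(double_lst, 3, 4)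
--     >>> double_lst
--     [1, 2, 1, 2, 3, 4, 3, 4]
--     >>> large_lst = [1, 4, 8]
--     >>> large_lst2 = insert_items(large_lst, 4, 4)
--     >>> large_lst2
--     [1, 4, 4, 8]
--     >>> large_lst3 = insert_items(large_lst2, 4, 6)
--     >>> large_lst3
--     [1, 4, 6, 4, 6, 8]
--     >>> large_lst3 is large_lst
--     True
--     >>> # Ban creating new lists
--     >>> from construct_check import check
--     >>> check(HW_SOURCE_FILE, 'insert_items',
--     ...       ['List', 'ListComp', 'Slice'])
--     True
--     """
--     i = 0  # 初始化一个索引变量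
--     while i < len(lst):  # 循环遍历列表
--         if lst[i] == entry:  # 如果当前元素等于 entry
--             lst.insert(i + 1, elem)  # 在它后面插入 elem
--             i += 1  # 增加索引，跳过插入的元素
--         i += 1  # 增加索引，继续遍历
--     return lst  # 返回修改后的列表
-- ===== SOURCE B (Python) =====
-- def insert_items(lst: list, entry: int, elem: int):
--     # Single backward pass: build the result back-to-front, then write it into lst in place.
--     out = []
--     for x in reversed(lst):
--         if x == entry:
--             out.append(elem)
--         out.append(x)
--     out.reverse()
--     lst[:] = out
--     return lst
-- ===== Notes on version B (the rewrite author's own statement) =====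
-- stated objective: faster
-- what changed: Replaces the while-loop with repeated O(n) list.insert calls by one backward pass that builds the result back-to-front and writes it into lst in place.
import Mathlib
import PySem

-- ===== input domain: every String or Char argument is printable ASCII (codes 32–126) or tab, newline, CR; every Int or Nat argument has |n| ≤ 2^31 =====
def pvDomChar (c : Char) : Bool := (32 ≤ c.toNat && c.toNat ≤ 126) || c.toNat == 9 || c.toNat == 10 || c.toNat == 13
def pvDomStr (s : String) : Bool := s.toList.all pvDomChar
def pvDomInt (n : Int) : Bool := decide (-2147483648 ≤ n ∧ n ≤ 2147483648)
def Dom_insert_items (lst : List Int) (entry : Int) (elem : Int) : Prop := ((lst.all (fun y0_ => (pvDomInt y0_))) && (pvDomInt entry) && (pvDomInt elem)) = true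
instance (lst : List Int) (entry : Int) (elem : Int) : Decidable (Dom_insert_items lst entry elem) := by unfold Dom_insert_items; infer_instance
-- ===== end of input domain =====

-- B replaces A's while-loop with repeated O(n) list.insert by one backward pass building the
-- result back-to-front, then written into lst in place (objective: faster; equivalence is about
-- the return value; both A and B mutate lst to that same value).


-- ===== PORT A =====
-- while i < len(lst): if lst[i] == entry: lst.insert(i+1, elem); i += 1;  i += 1
def pvGoA (entry elem : Int) (lst : List Int) (i : Nat) : List Int :=
  if h : i < lst.length then
    if lst[i] = entry then
      pvGoA entry elem (PySem.List.insert lst ((i : Int) + 1) elem) (i + 2)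
    else
      pvGoA entry elem lst (i + 1)
  else lst
termination_by lst.length - i
decreasing_by
  · have := PySem.List.length_insert lst ((i : Int) + 1) elem
    omega
  · omega

def insert_items (lst : List Int) (entry : Int) (elem : Int) : List Int :=
  pvGoA entry elem lst 0

-- ===== PORT B =====
-- out = []; for x in reversed(lst): if x == entry: out.append(elem); out.append(x); out.reverse()
def insert_items_alt (lst : List Int) (entry : Int) (elem : Int) : List Int :=
  (lst.reverse.foldl (fun out x => if x = entry then out ++ [elem, x] else out ++ [x]) []).reverse

-- ===== PRECONDITION & SPEC =====
def Spec_insert_items (lst : List Int) (entry : Int) (elem : Int) (out : List Int) : Prop := out = insert_items_alt lst entry elem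
instance (lst : List Int) (entry : Int) (elem : Int) (out : List Int) : Decidable (Spec_insert_items lst entry elem out) := by unfold Spec_insert_items; infer_instance

-- ===== CLAIM (what is proved, stated in full; the proofs are below) =====
def Claim_equal_insert_items : Prop := ∀ (lst : List Int) (entry : Int) (elem : Int), Dom_insert_items lst entry elem → Spec_insert_items lst entry elem (insert_items lst entry elem)

-- ===== LEMMAS AND PROOFS =====

-- canonical form both programs compute
def pvF (entry elem : Int) (lst : List Int) : List Int :=
  lst.flatMap (fun x => if x = entry then [x, elem] else [x])

theorem pvGoA_eq (entry elem : Int) (lst : List Int) (i : Nat) (hle : i ≤ lst.length) :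
    pvGoA entry elem lst i = lst.take i ++ pvF entry elem (lst.drop i) := by
  fun_induction pvGoA entry elem lst i with
  | case1 lst i h heq ih =>
    have hins : PySem.List.insert lst ((i : Int) + 1) elem
        = lst.take (i + 1) ++ elem :: lst.drop (i + 1) := by
      have := PySem.List.insert_natCast lst (i + 1) elem (by omega)
      push_cast at this
      simpa using this
    rw [ih (by simp [hins]; omega)]
    have hlen : (lst.take (i + 1)).length = i + 1 := by simp; omega
    have htake : (lst.take (i + 1) ++ elem :: lst.drop (i + 1)).take (i + 2)
        = lst.take (i + 1) ++ [elem] := by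
      rw [List.take_append]
      simp [hlen]
    have hdrop : (lst.take (i + 1) ++ elem :: lst.drop (i + 1)).drop (i + 2)
        = lst.drop (i + 1) := by
      rw [List.drop_append]
      simp [hlen]
    rw [hins, htake, hdrop]
    have hdropi : lst.drop i = lst[i] :: lst.drop (i + 1) := (List.getElem_cons_drop h).symm
    have htakei : lst.take (i + 1) = lst.take i ++ [lst[i]] := by
      rw [List.take_add_one]
      simp [List.getElem?_eq_getElem h]
    rw [hdropi, htakei, heq]
    simp [pvF]
  | case2 lst i h heq ih =>
    rw [ih (by omega)]
    have hdropi : lst.drop i = lst[i] :: lst.drop (i + 1) := (List.getElem_cons_drop h).symm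
    have htakei : lst.take (i + 1) = lst.take i ++ [lst[i]] := by
      rw [List.take_add_one]
      simp [List.getElem?_eq_getElem h]
    have hf : pvF entry elem (lst[i] :: lst.drop (i + 1))
        = lst[i] :: pvF entry elem (lst.drop (i + 1)) := by
      unfold pvF
      rw [List.flatMap_cons, if_neg heq, List.singleton_append]
    rw [hdropi, hf, htakei, List.append_assoc, List.singleton_append]
  | case3 lst i h =>
    have hlen : lst.length ≤ i := by omega
    rw [List.take_of_length_le hlen, List.drop_eq_nil_of_le hlen]
    simp [pvF]

theorem pvFoldB_eq (entry elem : Int) (l acc : List Int) :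
    l.foldl (fun out x => if x = entry then out ++ [elem, x] else out ++ [x]) acc
      = acc ++ l.flatMap (fun x => if x = entry then [elem, x] else [x]) := by
  induction l generalizing acc with
  | nil => simp
  | cons x l ih =>
    by_cases hx : x = entry <;> simp [List.foldl, ih, hx]

theorem alt_eq (entry elem : Int) (lst : List Int) :
    insert_items_alt lst entry elem = pvF entry elem lst := by
  unfold insert_items_alt
  rw [pvFoldB_eq]
  induction lst with
  | nil => simp [pvF]
  | cons x l ih =>
    by_cases hx : x = entry <;>
      simp_all [pvF, List.flatMap_append]

-- ===== VERDICT (by name: the statement is the Claim_ definition above) =====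
theorem insert_items_spec : Claim_equal_insert_items := by
  intro lst entry elem _
  unfold Spec_insert_items insert_items
  rw [pvGoA_eq entry elem lst 0 (by omega), alt_eq]
  simp
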